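-- pv_equiv track=rewrite | github.com/Uthaeus/codewars_python | 7kyu/double_trouble.py | trouble
-- ===== SOURCE A (Python) =====
-- def trouble(x, t):
--     i = 0
--     while i < len(x) - 1:
--         if x[i] + x[i + 1] == t:
--             del x[i + 1]
--             trouble(x, t)
--         i += 1
--     return x
-- ===== SOURCE B (Python) =====
-- def trouble(x, t):
--     out = []
--     for v in x:
--         if out and out[-1] + v == t:
--             continue
--         out.append(v)
--     return out
-- ===== Notes on version B (the rewrite author's own statement) =====
-- stated objective: faster
-- what changed: Replaced the quadratic delete-and-recursive-restart loop by a single left-to-right pass that keeps an output stack and skips an element when the last kept element plus it equals t.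
import Mathlib
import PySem

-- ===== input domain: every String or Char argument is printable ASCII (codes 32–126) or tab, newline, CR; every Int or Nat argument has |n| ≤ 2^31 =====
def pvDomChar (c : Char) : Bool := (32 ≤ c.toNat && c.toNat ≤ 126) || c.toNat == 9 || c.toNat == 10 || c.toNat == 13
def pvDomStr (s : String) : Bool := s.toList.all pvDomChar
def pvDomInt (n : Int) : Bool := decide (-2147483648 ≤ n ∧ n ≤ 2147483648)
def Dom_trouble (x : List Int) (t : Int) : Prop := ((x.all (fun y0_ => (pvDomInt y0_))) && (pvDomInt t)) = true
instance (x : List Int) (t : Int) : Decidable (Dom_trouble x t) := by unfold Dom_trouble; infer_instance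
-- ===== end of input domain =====

-- B replaces A's delete-and-recursive-restart scan by one left-to-right stack pass (asymptotically faster);
-- A mutates its list argument in place, B builds a fresh list: the equivalence proved here is about the return value only.

-- ===== PORT A =====
-- A's while loop: index i over x; on a pair summing to t, delete x[i+1], recursively restart (trouble x t = loop at i = 0),
-- then continue the loop at i+1. The subtype result only carries the length bound needed for termination;
-- the lemmas just below are the bounds the definition cites.
lemma pvIdx1 {x : List Int} {i : Nat} (h : i < x.length - 1) : i < x.length := by omega

lemma pvIdx2 {x : List Int} {i : Nat} (h : i < x.length - 1) : i + 1 < x.length := by omega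

lemma pvEraseLt {x : List Int} {i : Nat} (h : i < x.length - 1) :
    (x.eraseIdx (i+1)).length < x.length := by
  rw [List.length_eraseIdx]; simp [pvIdx2 h]; omega

lemma pvStepLt {x : List Int} {i : Nat} (h : i < x.length - 1) :
    x.length - (i+1) < x.length - i := by omega

def troubleLoop (x : List Int) (t : Int) (i : Nat) : {r : List Int // r.length ≤ x.length} :=
  if h : i < x.length - 1 then
    if x[i]'(pvIdx1 h) + x[i+1]'(pvIdx2 h) = t then
      match troubleLoop (x.eraseIdx (i+1)) t 0 with
      | ⟨r, hr⟩ =>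
        match troubleLoop r t (i+1) with
        | ⟨r2, hr2⟩ =>
          ⟨r2, Nat.le_of_lt (Nat.lt_of_le_of_lt (Nat.le_trans hr2 hr) (pvEraseLt h))⟩
    else
      troubleLoop x t (i+1)
  else ⟨x, Nat.le_refl _⟩
termination_by (x.length, x.length - i)
decreasing_by
  · exact Prod.Lex.left _ _ (pvEraseLt h)
  · exact Prod.Lex.left _ _ (Nat.lt_of_le_of_lt hr (pvEraseLt h))
  · exact Prod.Lex.right _ (pvStepLt h)

def trouble (x : List Int) (t : Int) : List Int := (troubleLoop x t 0).val

-- ===== PORT B =====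
-- B: one pass, keep an output list; skip v when the last kept element plus v equals t.
def trouble_alt (x : List Int) (t : Int) : List Int :=
  x.foldl (fun out v => if out.getLast? = some (t - v) then out else out ++ [v]) []

-- ===== PRECONDITION & SPEC =====
def Spec_trouble (x : List Int) (t : Int) (out : List Int) : Prop := out = trouble_alt x t
instance (x : List Int) (t : Int) (out : List Int) : Decidable (Spec_trouble x t out) := by unfold Spec_trouble; infer_instance

-- ===== CLAIM (what is proved, stated in full; the proofs are below) =====
def Claim_equal_trouble : Prop := ∀ (x : List Int) (t : Int), Dom_trouble x t → Spec_trouble x t (trouble x t)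

-- ===== LEMMAS AND PROOFS =====

-- The stack pass with an explicitly reversed accumulator: sgo t acc l scans l, acc holds the kept elements in reverse.
def sgo (t : Int) (acc : List Int) : List Int → List Int
  | [] => acc.reverse
  | v :: rest =>
    match acc with
    | a :: as => if a + v = t then sgo t (a :: as) rest else sgo t (v :: a :: as) rest
    | [] => sgo t [v] rest

-- B's fold equals the reversed-accumulator pass.
lemma foldl_eq_sgo (t : Int) : ∀ (l acc : List Int),
    l.foldl (fun out v => if out.getLast? = some (t - v) then out else out ++ [v]) acc.reverse
      = sgo t acc l := by
  intro l
  induction l with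
  | nil => intro acc; simp [sgo]
  | cons v rest ih =>
    intro acc
    cases acc with
    | nil =>
      have hc1 : ((([] : List Int)).reverse.getLast? = some (t - v)) = False := by simp
      simp only [List.foldl_cons, hc1, if_false]
      have hstep : sgo t [] (v :: rest) = sgo t [v] rest := by simp [sgo]
      rw [hstep]
      have h2 := ih [v]
      rw [show ([v] : List Int).reverse = ([] : List Int).reverse ++ [v] from by simp] at h2
      exact h2
    | cons a as =>
      by_cases hp : a + v = t
      · have hc1 : (((a :: as).reverse).getLast? = some (t - v)) = True := by
          simp [List.getLast?_reverse]; omega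
        simp only [List.foldl_cons, hc1, if_true]
        have hstep : sgo t (a :: as) (v :: rest) = sgo t (a :: as) rest := by simp [sgo, hp]
        rw [hstep]; exact ih (a :: as)
      · have hc1 : (((a :: as).reverse).getLast? = some (t - v)) = False := by
          simp [List.getLast?_reverse]; omega
        simp only [List.foldl_cons, hc1, if_false]
        have hstep : sgo t (a :: as) (v :: rest) = sgo t (v :: a :: as) rest := by simp [sgo, hp]
        rw [hstep]
        have h2 := ih (v :: a :: as)
        rw [show (v :: a :: as).reverse = (a :: as).reverse ++ [v] from by simp] at h2
        exact h2

lemma trouble_alt_eq_sgo (x : List Int) (t : Int) : trouble_alt x t = sgo t [] x := by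
  have := foldl_eq_sgo t x []
  simpa [trouble_alt] using this

-- The result of the pass has no adjacent pair summing to t.
lemma sgo_chain (t : Int) : ∀ (l acc : List Int),
    List.IsChain (fun a b => b + a ≠ t) acc →
    List.IsChain (fun a b => a + b ≠ t) (sgo t acc l) := by
  intro l
  induction l with
  | nil =>
    intro acc hacc
    exact List.isChain_reverse.mpr hacc
  | cons v rest ih =>
    intro acc hacc
    cases acc with
    | nil =>
      have hstep : sgo t [] (v :: rest) = sgo t [v] rest := by simp [sgo]
      rw [hstep]
      exact ih [v] (by simp)
    | cons a as =>
      by_cases hp : a + v = t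
      · have hstep : sgo t (a :: as) (v :: rest) = sgo t (a :: as) rest := by simp [sgo, hp]
        rw [hstep]; exact ih (a :: as) hacc
      · have hstep : sgo t (a :: as) (v :: rest) = sgo t (v :: a :: as) rest := by simp [sgo, hp]
        rw [hstep]
        exact ih (v :: a :: as) (List.IsChain.cons_cons hp hacc)

-- Scanning a clean block just moves it onto the accumulator.
lemma sgo_pass (t : Int) : ∀ (q acc rest : List Int),
    List.IsChain (fun a b => a + b ≠ t) (acc.reverse ++ q) →
    sgo t acc (q ++ rest) = sgo t (q.reverse ++ acc) rest := by
  intro q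
  induction q with
  | nil => intro acc rest _; simp
  | cons v q' ih =>
    intro acc rest hc
    cases acc with
    | nil =>
      have h0 : sgo t [] (v :: (q' ++ rest)) = sgo t [v] (q' ++ rest) := by simp [sgo]
      have hih := ih [v] rest (by simpa using hc)
      rw [show (v :: q') ++ rest = v :: (q' ++ rest) from rfl, h0, hih]
      congr 1; simp
    | cons a as =>
      have hav : a + v ≠ t := by
        rcases List.isChain_append.mp hc with ⟨_, _, hj⟩
        exact hj a (by rw [List.getLast?_reverse]; rfl) v rfl
      have hstep : sgo t (a :: as) (v :: (q' ++ rest)) = sgo t (v :: a :: as) (q' ++ rest) := by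
        simp [sgo, hav]
      have hc2 : List.IsChain (fun a b => a + b ≠ t) ((v :: a :: as).reverse ++ q') := by
        have : (v :: a :: as).reverse ++ q' = (a :: as).reverse ++ (v :: q') := by simp
        rw [this]; exact hc
      have hih := ih (v :: a :: as) rest hc2
      rw [show (v :: q') ++ rest = v :: (q' ++ rest) from rfl, hstep, hih]
      congr 1; simp

lemma sgo_clean (t : Int) (x : List Int)
    (hc : List.IsChain (fun a b => a + b ≠ t) x) : sgo t [] x = x := by
  have := sgo_pass t x [] [] (by simpa using hc)
  simpa [sgo] using this

-- Deleting the second element of the FIRST adjacent pair summing to t does not change the pass's result.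
lemma sgo_erase (t : Int) (x : List Int) (i : Nat) (h1 : i + 1 < x.length)
    (hc : List.IsChain (fun a b => a + b ≠ t) (x.take (i+1)))
    (hp : x[i]'(by omega) + x[i+1]'h1 = t) :
    sgo t [] (x.eraseIdx (i+1)) = sgo t [] x := by
  have hqlen : (x.take (i+1)).length = i + 1 := by
    rw [List.length_take]; omega
  have hlast : (x.take (i+1)).getLast? = some (x[i]'(by omega)) := by
    rw [List.getLast?_eq_getElem?]
    rw [hqlen]
    simp [show i < i + 1 by omega, List.getElem?_eq_getElem (show i < x.length by omega)]
  have hsplit : x = x.take (i+1) ++ (x[i+1]'h1 :: x.drop (i+2)) := by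
    conv_lhs => rw [← List.take_append_drop (i+1) x]
    congr 1
    rw [List.drop_eq_getElem_cons h1]
  have herase : x.eraseIdx (i+1) = x.take (i+1) ++ x.drop (i+2) := by
    rw [List.eraseIdx_eq_take_drop_succ]
  obtain ⟨qs, hqs⟩ : ∃ qs, (x.take (i+1)).reverse = x[i]'(by omega) :: qs := by
    have hh : (x.take (i+1)).reverse.head? = some (x[i]'(by omega)) := by
      rw [List.head?_reverse]; exact hlast
    cases hrev : (x.take (i+1)).reverse with
    | nil => rw [hrev] at hh; simp at hh
    | cons b bs => rw [hrev] at hh; simp at hh; exact ⟨bs, by rw [hh]⟩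
  have left : sgo t [] (x.eraseIdx (i+1)) = sgo t ((x.take (i+1)).reverse) (x.drop (i+2)) := by
    rw [herase]
    have := sgo_pass t (x.take (i+1)) [] (x.drop (i+2)) (by simpa using hc)
    simpa using this
  have right : sgo t [] x = sgo t ((x.take (i+1)).reverse) (x[i+1]'h1 :: x.drop (i+2)) := by
    conv_lhs => rw [hsplit]
    have := sgo_pass t (x.take (i+1)) [] (x[i+1]'h1 :: x.drop (i+2)) (by simpa using hc)
    simpa using this
  rw [left, right, hqs]
  simp [sgo, hp]

-- A's loop on a clean list returns it unchanged.
lemma loop_clean (t : Int) : ∀ (n : Nat) (x : List Int) (i : Nat), x.length - i ≤ n →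
    List.IsChain (fun a b => a + b ≠ t) x → (troubleLoop x t i).val = x := by
  intro n
  induction n with
  | zero =>
    intro x i hi _
    rw [troubleLoop]
    have : ¬ i < x.length - 1 := by omega
    simp [this]
  | succ n ih =>
    intro x i hi hc
    rw [troubleLoop]
    by_cases h : i < x.length - 1
    · have hpair : x[i]'(by omega) + x[i+1]'(by omega) ≠ t := by
        exact List.isChain_iff_getElem.mp hc i (by omega)
      simp only [dif_pos h, if_neg hpair]
      exact ih x (i+1) (by omega) hc
    · simp [h]

-- Main invariant: from a clean prefix, A's loop computes the stack pass's result.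
lemma loop_main (t : Int) : ∀ (N : Nat) (x : List Int), x.length ≤ N →
    ∀ (n i : Nat), x.length - i ≤ n →
    (∀ j (hj : j + 1 < x.length), j < i → x[j]'(by omega) + x[j+1]'hj ≠ t) →
    (troubleLoop x t i).val = sgo t [] x := by
  intro N
  induction N with
  | zero =>
    intro x hx n i _ _
    have hx0 : x = [] := List.length_eq_zero_iff.mp (by omega)
    subst hx0
    rw [troubleLoop]; simp [sgo]
  | succ N ihN =>
    intro x hxN n
    induction n with
    | zero =>
      intro i hi hcl
      have hc : List.IsChain (fun a b => a + b ≠ t) x := by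
        rw [List.isChain_iff_getElem]
        intro j hj
        exact hcl j (by omega) (by omega)
      rw [troubleLoop]
      have hnot : ¬ i < x.length - 1 := by omega
      rw [sgo_clean t x hc]
      simp [hnot]
    | succ n ihn =>
      intro i hi hcl
      by_cases h : i < x.length - 1
      · by_cases hpair : x[i]'(by omega) + x[i+1]'(by omega) = t
        · rw [troubleLoop]
          simp only [dif_pos h, if_pos hpair]
          have hxlen' : (x.eraseIdx (i+1)).length = x.length - 1 := by
            rw [List.length_eraseIdx]; simp [show i+1 < x.length by omega]
          have h1 : (troubleLoop (x.eraseIdx (i+1)) t 0).val = sgo t [] (x.eraseIdx (i+1)) := by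
            apply ihN (x.eraseIdx (i+1)) (by omega) ((x.eraseIdx (i+1)).length) 0 (by omega)
            intro j hj hj0; omega
          have hctake : List.IsChain (fun a b => a + b ≠ t) (x.take (i+1)) := by
            rw [List.isChain_iff_getElem]
            intro j hj
            rw [List.length_take] at hj
            have hjx : j + 1 < x.length := by omega
            have e1 : (x.take (i+1))[j]'(by rw [List.length_take]; omega) = x[j]'(by omega) :=
              List.getElem_take
            have e2 : (x.take (i+1))[j+1]'(by rw [List.length_take]; omega) = x[j+1]'hjx :=
              List.getElem_take
            rw [e1, e2]
            exact hcl j hjx (by omega)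
          have h4 : sgo t [] (x.eraseIdx (i+1)) = sgo t [] x :=
            sgo_erase t x i (by omega) hctake hpair
          have h2 : List.IsChain (fun a b => a + b ≠ t) (sgo t [] (x.eraseIdx (i+1))) :=
            sgo_chain t _ [] (by simp)
          cases hE : troubleLoop (x.eraseIdx (i+1)) t 0 with
          | mk r hr =>
            have hrval : r = sgo t [] (x.eraseIdx (i+1)) := by
              rw [← h1, hE]
            cases hE2 : troubleLoop r t (i+1) with
            | mk r2 hr2 =>
              have hr2r : r2 = r := by
                have := loop_clean t (r.length) r (i+1) (by omega) (by rw [hrval]; exact h2)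
                rw [hE2] at this; exact this
              simp only [hr2r, hrval, h4]
        · rw [troubleLoop]
          simp only [dif_pos h, if_neg hpair]
          apply ihn (i+1) (by omega)
          intro j hj hji
          by_cases hji' : j < i
          · exact hcl j hj hji'
          · have hj_eq : j = i := by omega
            subst hj_eq
            exact hpair
      · have hc : List.IsChain (fun a b => a + b ≠ t) x := by
          rw [List.isChain_iff_getElem]
          intro j hj
          exact hcl j (by omega) (by omega)
        rw [troubleLoop]
        rw [sgo_clean t x hc]
        simp [h]

-- ===== VERDICT (by name: the statement is the Claim_ definition above) =====
theorem trouble_spec : Claim_equal_trouble := by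
  intro x t _
  unfold Spec_trouble
  rw [trouble_alt_eq_sgo]
  exact loop_main t x.length x (le_refl _) x.length 0 (by omega) (by intro j hj hj0; omega)
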